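-- pv_equiv track=rewrite | github.com/wentianhao/pyhton | 实验/w4/online.py | calc
-- ===== SOURCE A (Python) =====
-- def calc(invert, words, resultSet):
--     values = []
--     for item in resultSet:
--         value = 0
--         for word in words:
--             if word in invert and item in invert[word]:
--                 value = value + invert[word][item]
--         values.append((item,value))
--     return values
-- ===== SOURCE B (Python) =====
-- def calc(invert, words, resultSet):
--     acc = {}
--     for word in words:
--         entries = invert.get(word)
--         if entries is not None:
--             for item, w in entries.items():
--                 acc[item] = acc.get(item, 0) + w
--     return [(item, acc.get(item, 0)) for item in resultSet]
-- ===== Notes on version B (the rewrite author's own statement) =====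
-- stated objective: faster
-- what changed: Instead of re-scanning every word's posting dict for each result item (R*W lookups), B folds the selected words' postings once into an accumulator dict and then answers each result item with a single lookup.
import Mathlib
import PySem

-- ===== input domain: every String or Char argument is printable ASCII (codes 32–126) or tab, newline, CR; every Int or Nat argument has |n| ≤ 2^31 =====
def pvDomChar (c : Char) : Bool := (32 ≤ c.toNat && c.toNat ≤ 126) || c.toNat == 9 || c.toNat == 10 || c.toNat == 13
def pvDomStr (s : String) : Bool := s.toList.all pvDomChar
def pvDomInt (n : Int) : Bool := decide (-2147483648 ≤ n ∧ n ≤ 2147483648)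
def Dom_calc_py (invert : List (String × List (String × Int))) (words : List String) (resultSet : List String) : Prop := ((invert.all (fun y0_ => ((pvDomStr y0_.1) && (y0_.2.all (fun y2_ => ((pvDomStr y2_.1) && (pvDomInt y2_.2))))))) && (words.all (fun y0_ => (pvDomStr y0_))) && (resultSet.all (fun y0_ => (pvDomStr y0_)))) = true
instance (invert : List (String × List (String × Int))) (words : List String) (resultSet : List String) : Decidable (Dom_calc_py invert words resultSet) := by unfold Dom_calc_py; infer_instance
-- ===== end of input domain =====

-- B replaces A's per-item re-scan of every word's posting dict by one accumulation pass over
-- the selected words' postings followed by a single lookup per result item (objective: faster).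


-- ===== PORT A =====
def calc_py (invert : List (String × List (String × Int))) (words : List String) (resultSet : List String) : List (String × Int) :=
  resultSet.foldl (fun values item =>
    values ++ [(item,
      words.foldl (fun value word =>
        match (PySem.Dict.mk invert).get? word with
        | some d =>
          match (PySem.Dict.mk d).get? item with
          | some x => value + x
          | none => value
        | none => value) 0)]) []

-- ===== PORT B =====
def calc_py_alt (invert : List (String × List (String × Int))) (words : List String) (resultSet : List String) : List (String × Int) :=
  let acc : PySem.Dict String Int := words.foldl (fun acc word =>
    match (PySem.Dict.mk invert).get? word with
    | some entries => entries.foldl (fun a p => a.insert p.1 (a.getD p.1 0 + p.2)) acc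
    | none => acc) PySem.Dict.empty
  resultSet.map (fun item => (item, acc.getD item 0))

-- ===== PRECONDITION & SPEC =====
-- Pre_ is the dict-representation invariant: all keys distinct (an association list with
-- duplicate keys does not represent any Python dict, so A never sees such an input).
def Pre_calc_py (invert : List (String × List (String × Int))) (words : List String) (resultSet : List String) : Prop :=
  (invert.map Prod.fst).Nodup ∧ ∀ p ∈ invert, (p.2.map Prod.fst).Nodup
instance (invert : List (String × List (String × Int))) (words : List String) (resultSet : List String) : Decidable (Pre_calc_py invert words resultSet) := by unfold Pre_calc_py; infer_instance
def pvWitness_calc_py : (List (String × List (String × Int))) × List String × List String :=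
  ([("a", [("x", 2), ("y", 3)]), ("b", [("x", 5)])], ["a", "b", "a"], ["x", "y", "z"])

def Spec_calc_py (invert : List (String × List (String × Int))) (words : List String) (resultSet : List String) (out : List (String × Int)) : Prop := out = calc_py_alt invert words resultSet
instance (invert : List (String × List (String × Int))) (words : List String) (resultSet : List String) (out : List (String × Int)) : Decidable (Spec_calc_py invert words resultSet out) := by unfold Spec_calc_py; infer_instance

-- ===== CLAIM (what is proved, stated in full; the proofs are below) =====
def Claim_equal_calc_py : Prop := ∀ (invert : List (String × List (String × Int))) (words : List String) (resultSet : List String), Dom_calc_py invert words resultSet → Pre_calc_py invert words resultSet → Spec_calc_py invert words resultSet (calc_py invert words resultSet)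

-- ===== LEMMAS AND PROOFS =====

-- weight contributed by one word to one item (proof-only helper)
def pvWeight (invert : List (String × List (String × Int))) (item : String) (w : String) : Int :=
  match (PySem.Dict.mk invert).get? w with
  | some d => ((PySem.Dict.mk d).get? item).getD 0
  | none => 0

-- first-match lookup in a key-free region is none
theorem pv_get?_mk_none {α : Type} (d : List (String × α)) (k : String)
    (h : k ∉ d.map Prod.fst) : (PySem.Dict.mk d).get? k = none := by
  induction d with
  | nil => rfl
  | cons p t ih =>
    obtain ⟨pk, pv⟩ := p
    rw [PySem.Dict.get?_mk_cons]
    simp only [List.map_cons, List.mem_cons, not_or] at h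
    rw [if_neg (by simp [Ne.symm h.1])]
    exact ih h.2

-- A's inner loop is the sum of the per-word weights
theorem pv_inner (invert : List (String × List (String × Int))) (item : String)
    (words : List String) (v : Int) :
    words.foldl (fun value word =>
        match (PySem.Dict.mk invert).get? word with
        | some d =>
          match (PySem.Dict.mk d).get? item with
          | some x => value + x
          | none => value
        | none => value) v
      = v + (words.map (pvWeight invert item)).sum := by
  refine Eq.trans (PySem.List.foldl_congr_mem words _
      (fun value word => value + pvWeight invert item word) v ?_) ?_
  · intro acc w _
    unfold pvWeight
    rcases h : (PySem.Dict.mk invert).get? w with _ | d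
    · simp [h]
    · rcases h2 : (PySem.Dict.mk d).get? item with _ | x <;> simp [h, h2]
  · exact PySem.List.foldl_add _ _ _

-- accumulating one posting list adds exactly its (unique-key) value at each item
theorem pv_addEntries (d : List (String × Int)) :
    ∀ (acc : PySem.Dict String Int) (item : String), (d.map Prod.fst).Nodup →
    (d.foldl (fun a p => a.insert p.1 (a.getD p.1 0 + p.2)) acc).getD item 0
      = acc.getD item 0 + ((PySem.Dict.mk d).get? item).getD 0 := by
  induction d with
  | nil => intro acc item _; simp; rfl
  | cons p t ih =>
    intro acc item hnd
    obtain ⟨k, v⟩ := p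
    simp only [List.map_cons, List.nodup_cons] at hnd
    rw [List.foldl_cons, ih _ item hnd.2, PySem.Dict.get?_mk_cons]
    by_cases hik : item = k
    · subst hik
      rw [pv_get?_mk_none t item hnd.1, PySem.Dict.getD_insert_self]
      simp
    · rw [PySem.Dict.getD_insert_of_ne _ _ _ hik,
        if_neg (by simp [Ne.symm hik])]

-- the accumulator's value at item is the sum of the per-word weights
theorem pv_build (invert : List (String × List (String × Int)))
    (hin : ∀ p ∈ invert, (p.2.map Prod.fst).Nodup) :
    ∀ (words : List String) (acc : PySem.Dict String Int) (item : String),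
    (words.foldl (fun acc word =>
        match (PySem.Dict.mk invert).get? word with
        | some entries => entries.foldl (fun a p => a.insert p.1 (a.getD p.1 0 + p.2)) acc
        | none => acc) acc).getD item 0
      = acc.getD item 0 + (words.map (pvWeight invert item)).sum := by
  intro words
  induction words with
  | nil => intro acc item; simp
  | cons w ws ih =>
    intro acc item
    simp only [List.foldl_cons, List.map_cons, List.sum_cons]
    unfold pvWeight
    rcases h : (PySem.Dict.mk invert).get? w with _ | d
    · rw [ih]; unfold pvWeight; ring
    · have hmem : (w, d) ∈ invert := PySem.Dict.mem_items_of_get?_eq_some _ h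
      rw [ih, pv_addEntries d acc item (hin _ hmem)]
      unfold pvWeight; ring

-- append-accumulation is map
theorem pv_foldl_append {β : Type} (g : String → β) :
    ∀ (l : List String) (init : List β),
    l.foldl (fun vs item => vs ++ [g item]) init = init ++ l.map g := by
  intro l
  induction l with
  | nil => intro init; simp
  | cons x t ih => intro init; simp [ih]

-- ===== VERDICT (by name: the statement is the Claim_ definition above) =====
theorem calc_py_spec : Claim_equal_calc_py := by
  intro invert words resultSet _ hpre
  unfold Spec_calc_py calc_py calc_py_alt
  rw [pv_foldl_append]
  simp only [List.nil_append]
  apply List.map_congr_left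
  intro item _
  rw [pv_build invert hpre.2 words PySem.Dict.empty item, pv_inner]
  simp
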